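-- pv_equiv track=rewrite | github.com/k0rd/bakerrrr | game/service_runtime.py | _casino_straight_high
-- ===== SOURCE A (Python) =====
-- def _casino_straight_high(ranks):
--     unique = sorted({int(rank) for rank in list(ranks or ()) if int(rank) > 0}, reverse=True)
--     if 14 in unique:
--         unique.append(1)
--     streak = 1
--     for idx in range(len(unique) - 1):
--         if unique[idx] - 1 == unique[idx + 1]:
--             streak += 1
--             if streak >= 5:
--                 return unique[idx - 3]
--         elif unique[idx] != unique[idx + 1]:
--             streak = 1
--     return 0
-- ===== SOURCE B (Python) =====
-- def _casino_straight_high(ranks):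
--     values = {int(r) for r in (ranks or ()) if int(r) > 0}
--     if 14 in values:
--         values.add(1)
--     for high in sorted(values, reverse=True):
--         if all(high - k in values for k in (1, 2, 3, 4)):
--             return high
--     return 0
-- ===== Notes on version B (the rewrite author's own statement) =====
-- stated objective: simpler
-- what changed: Replaces the streak counter scanned over adjacent pairs of the descending sorted list (with index arithmetic unique[idx-3] to recover the straight's top card) by a direct membership test: for each candidate high card in descending order, check that the four cards below it are all in the set; first hit wins.
import Mathlib
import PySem

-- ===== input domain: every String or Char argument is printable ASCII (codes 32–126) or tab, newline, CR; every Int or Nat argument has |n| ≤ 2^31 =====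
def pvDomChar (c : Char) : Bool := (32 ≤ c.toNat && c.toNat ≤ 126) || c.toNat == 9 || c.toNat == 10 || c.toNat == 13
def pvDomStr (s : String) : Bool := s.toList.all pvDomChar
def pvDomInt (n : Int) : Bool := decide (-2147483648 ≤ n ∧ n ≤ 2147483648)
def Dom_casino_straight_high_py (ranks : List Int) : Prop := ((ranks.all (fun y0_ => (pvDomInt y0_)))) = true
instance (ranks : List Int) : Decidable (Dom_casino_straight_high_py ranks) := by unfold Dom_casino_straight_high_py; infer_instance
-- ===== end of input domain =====

-- B replaces A's streak counter over adjacent pairs of the sorted list by a direct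
-- set-membership test of each candidate high card in descending order (objective: simpler).

-- ===== PORT A =====
-- the loop body of A (early return encoded as a frozen `some` in the first component)
def stepA (u : List Int) (st : Option Int × Int) (idx : Int) : Option Int × Int :=
  match st with
  | (some r, s) => (some r, s)
  | (none, streak) =>
    if PySem.List.pyGetD u idx 0 - 1 = PySem.List.pyGetD u (idx + 1) 0 then
      if streak + 1 ≥ 5 then (some (PySem.List.pyGetD u (idx - 3) 0), streak + 1)
      else (none, streak + 1)
    else if PySem.List.pyGetD u idx 0 ≠ PySem.List.pyGetD u (idx + 1) 0 then (none, 1)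
    else (none, streak)

def casino_straight_high_py (ranks : List Int) : Int :=
  let base := PySem.List.sorted (PySem.Set.ofList (ranks.filter (fun r => decide (0 < r)))) (fun x => x) true
  let unique := if 14 ∈ base then base ++ [1] else base
  ((PySem.List.pyRange 0 ((unique.length : Int) - 1) 1).foldl (stepA unique) (none, 1)).1.getD 0

-- ===== PORT B =====
def casino_straight_high_py_alt (ranks : List Int) : Int :=
  let values : PySem.Set Int := PySem.Set.ofList (ranks.filter (fun r => decide (0 < r)))
  let values2 := if PySem.Set.contains values 14 then PySem.Set.add values 1 else values
  match (PySem.List.sorted values2 (fun x => x) true).find?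
      (fun v => [1, 2, 3, 4].all (fun k => PySem.Set.contains values2 (v - k))) with
  | some v => v
  | none => 0

-- ===== PRECONDITION & SPEC =====
def Spec_casino_straight_high_py (ranks : List Int) (out : Int) : Prop := out = casino_straight_high_py_alt ranks
instance (ranks : List Int) (out : Int) : Decidable (Spec_casino_straight_high_py ranks out) := by unfold Spec_casino_straight_high_py; infer_instance

-- ===== CLAIM (what is proved, stated in full; the proofs are below) =====
def Claim_equal_casino_straight_high_py : Prop := ∀ (ranks : List Int), Dom_casino_straight_high_py ranks → Spec_casino_straight_high_py ranks (casino_straight_high_py ranks)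

-- ===== LEMMAS AND PROOFS =====

def scanGo : List Int → List Int → Int → Option Int
  | w, a :: b :: rest, s =>
    if a - 1 = b then
      if s + 1 ≥ 5 then some (w.getD 2 0)
      else scanGo (a :: w.take 2) (b :: rest) (s + 1)
    else if a ≠ b then scanGo (a :: w.take 2) (b :: rest) 1
    else scanGo (a :: w.take 2) (b :: rest) s
  | _, _, _ => none

def goodb (S : List Int) (v : Int) : Bool :=
  decide (v - 1 ∈ S) && (decide (v - 2 ∈ S) && (decide (v - 3 ∈ S) && decide (v - 4 ∈ S)))

lemma getD_take_of_lt (w : List Int) (n k : Nat) (d : Int) (h : k < n) :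
    (w.take n).getD k d = w.getD k d := by
  simp [List.getD_eq_getElem?_getD, h]

lemma foldl_stepA_some (u : List Int) (l : List Int) (r : Int) (s : Int) :
    l.foldl (stepA u) (some r, s) = (some r, s) := by
  induction l with
  | nil => rfl
  | cons x xs ih => simpa [stepA] using ih

lemma scan_translate (u : List Int) :
    ∀ (n i : Nat) (s : Int), u.length - i ≤ n → 1 ≤ s → s ≤ (i : Int) + 1 →
    ((PySem.List.pyRange (i : Int) ((u.length : Int) - 1) 1).foldl (stepA u) (none, s)).1
      = scanGo ((u.take i).reverse.take 3) (u.drop i) s := by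
  intro n
  induction n with
  | zero =>
    intro i s hn h1 h2
    have hle : u.length ≤ i := by omega
    rw [PySem.List.pyRange_one_eq_nil (by omega)]
    rw [List.drop_eq_nil_of_le hle]
    rfl
  | succ n ih =>
    intro i s hn h1 h2
    by_cases hi : i + 2 ≤ u.length
    · -- at least two elements remain
      have hia : i < u.length := by omega
      have hib : i + 1 < u.length := by omega
      rw [PySem.List.pyRange_one_cons (by omega)]
      rw [List.foldl_cons]
      -- the current pair
      have hga : PySem.List.pyGetD u (i : Int) 0 = u[i] := by
        rw [PySem.List.pyGetD_natCast, List.getD_eq_getElem u 0 hia]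
      have hgb : PySem.List.pyGetD u ((i : Int) + 1) 0 = u[i+1] := by
        have : ((i : Int) + 1) = ((i + 1 : Nat) : Int) := by push_cast; ring
        rw [this, PySem.List.pyGetD_natCast, List.getD_eq_getElem u 0 hib]
      have hdrop : u.drop i = u[i] :: u[i+1] :: u.drop (i+2) := by
        rw [List.drop_eq_getElem_cons hia, List.drop_eq_getElem_cons hib]
      have hwin : (u.take (i+1)).reverse.take 3
          = u[i] :: ((u.take i).reverse.take 3).take 2 := by
        have htake : u.take (i+1) = u.take i ++ [u[i]] := by
          rw [List.take_add_one, List.getElem?_eq_getElem hia]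
          rfl
        rw [htake, List.reverse_append]
        norm_num [List.take_take]
      -- unfold one step of stepA
      rw [show stepA u (none, s) (i : Int)
            = if u[i] - 1 = u[i+1] then
                (if s + 1 ≥ 5 then (some (PySem.List.pyGetD u ((i : Int) - 3) 0), s + 1)
                 else (none, s + 1))
              else if u[i] ≠ u[i+1] then (none, 1) else (none, s) from by
        simp [stepA, hga, hgb]]
      rw [hdrop]
      by_cases hab : u[i] - 1 = u[i+1]
      · by_cases hs5 : s + 1 ≥ 5
        · -- return: frozen fold, and the window value
          have hi3 : 3 ≤ i := by omega
          rw [if_pos hab, if_pos hs5, foldl_stepA_some]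
          have hret : PySem.List.pyGetD u ((i : Int) - 3) 0 = u[i - 3] := by
            have : ((i : Int) - 3) = ((i - 3 : Nat) : Int) := by omega
            rw [this, PySem.List.pyGetD_natCast, List.getD_eq_getElem u 0 (by omega)]
          have hw2 : ((u.take i).reverse.take 3).getD 2 0 = u[i - 3] := by
            rw [getD_take_of_lt _ 3 2 0 (by omega)]
            have hlen : (u.take i).reverse.length = i := by simp [List.length_take]; omega
            rw [List.getD_eq_getElem _ 0 (by omega)]
            rw [List.getElem_reverse]
            rw [List.getElem_take]
            congr 1
            simp [List.length_take]
            omega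
          rw [scanGo]
          rw [if_pos hab, if_pos hs5]
          rw [hw2]
          simp [hret]
        · rw [if_pos hab, if_neg hs5]
          rw [show ((i : Int) + 1) = ((i + 1 : Nat) : Int) by push_cast; ring]
          rw [ih (i+1) (s+1) (by omega) (by omega) (by push_cast; omega)]
          rw [scanGo, if_pos hab, if_neg hs5]
          rw [hwin]
          congr 1
          rw [List.drop_eq_getElem_cons hib]
      · by_cases hne : u[i] ≠ u[i+1]
        · rw [if_neg hab, if_pos hne]
          rw [show ((i : Int) + 1) = ((i + 1 : Nat) : Int) by push_cast; ring]
          rw [ih (i+1) 1 (by omega) (by omega) (by push_cast; omega)]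
          rw [scanGo, if_neg hab, if_pos hne]
          rw [hwin]
          congr 1
          rw [List.drop_eq_getElem_cons hib]
        · rw [if_neg hab, if_neg hne]
          rw [show ((i : Int) + 1) = ((i + 1 : Nat) : Int) by push_cast; ring]
          rw [ih (i+1) s (by omega) (by omega) (by push_cast; omega)]
          rw [scanGo, if_neg hab, if_neg hne]
          rw [hwin]
          congr 1
          rw [List.drop_eq_getElem_cons hib]
    · -- fewer than two elements remain: empty range, scanGo falls through
      rw [PySem.List.pyRange_one_eq_nil (by omega)]
      have : u.drop i = [] ∨ ∃ x, u.drop i = [x] := by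
        rcases h : u.drop i with _ | ⟨x, t⟩
        · exact Or.inl rfl
        · right; refine ⟨x, ?_⟩
          have := congrArg List.length h
          simp at this
          have : t = [] := by
            have ht := congrArg List.length h
            simp at ht
            exact List.eq_nil_of_length_eq_zero (by omega)
          simp [this]
      rcases this with h | ⟨x, h⟩ <;> rw [h] <;> rfl

lemma scanGo_strip (v : List Int) (hv : v ≠ []) (hlast : v.getLast? = some 1) :
    ∀ (w : List Int) (s : Int), scanGo w (v ++ [1]) s = scanGo w v s := by
  induction v with
  | nil => simp at hv
  | cons a t ih =>
    intro w s
    rcases t with _ | ⟨b, t'⟩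
    · have ha : a = 1 := by simpa using hlast
      subst ha
      norm_num [scanGo]
    · have hlast' : (b :: t').getLast? = some 1 := by
        rwa [List.getLast?_cons_cons] at hlast
      have ih' := ih (by simp) hlast'
      show scanGo w (a :: b :: (t' ++ [1])) s = scanGo w (a :: b :: t') s
      rw [scanGo, scanGo]
      split_ifs <;> first
        | rfl
        | exact ih' _ _

lemma getLast?_pairwise_gt_min (L : List Int) (hd : L.Pairwise (· > ·)) (h1 : (1 : Int) ∈ L)
    (hge : ∀ x ∈ L, (1 : Int) ≤ x) : L.getLast? = some 1 := by
  induction L with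
  | nil => simp at h1
  | cons a t ih =>
    rcases t with _ | ⟨b, t'⟩
    · simp at h1 ⊢; omega
    · rw [List.getLast?_cons_cons]
      apply ih (List.Pairwise.of_cons hd)
      · rcases List.mem_cons.mp h1 with h1 | h1
        · exfalso
          have hb : (1:Int) ≤ b := hge b (by simp)
          have := (List.pairwise_cons.mp hd).1 b (by simp)
          omega
        · exact h1
      · intro x hx; exact hge x (by simp [hx])

lemma find?_first_desc (L : List Int) (p : Int → Bool) (hd : L.Pairwise (· > ·)) (m : Int)
    (hm : m ∈ L) (hpm : p m = true) (hmax : ∀ v ∈ L, m < v → p v = false) :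
    L.find? p = some m := by
  induction L with
  | nil => simp at hm
  | cons a t ih =>
    rcases List.mem_cons.mp hm with hm | hm
    · subst hm; simp [hpm]
    · have ham : m < a := (List.pairwise_cons.mp hd).1 m hm
      have hpa : p a = false := hmax a (by simp) ham
      rw [List.find?_cons, hpa]
      exact ih (List.Pairwise.of_cons hd) hm (fun v hv h => hmax v (by simp [hv]) h)

lemma goodb_false_of (S : List Int) (a v : Int) (h : a - 1 ∉ S) (h1 : a ≤ v) (h2 : v ≤ a + 3) :
    goodb S v = false := by
  have hcase : v - 1 = a - 1 ∨ v - 2 = a - 1 ∨ v - 3 = a - 1 ∨ v - 4 = a - 1 := by omega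
  simp only [goodb, Bool.and_eq_false_iff, decide_eq_false_iff_not]
  rcases hcase with hc | hc | hc | hc <;> rw [← hc] at h <;> tauto

lemma scan_main (S : List Int) :
    ∀ (rest : List Int) (a : Int) (w : List Int) (s : Int),
    1 ≤ s → s ≤ 4 →
    (a :: rest).Pairwise (· > ·) →
    (∀ k : Int, 0 ≤ k → k < s → a + k ∈ S) →
    (a + s ∉ S) →
    (∀ v ∈ S, a + s ≤ v → goodb S v = false) →
    (∀ v : Int, v ≤ a → (v ∈ S ↔ v ∈ a :: rest)) →
    (∀ k : Nat, (k : Int) + 2 ≤ s → w.getD k 0 = a + (k : Int) + 1) →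
    (∃ m, scanGo w (a :: rest) s = some m ∧ m ∈ S ∧ goodb S m = true ∧
        ∀ v ∈ S, m < v → goodb S v = false)
    ∨ (scanGo w (a :: rest) s = none ∧ ∀ v ∈ S, goodb S v = false) := by
  intro rest
  induction rest with
  | nil =>
    intro a w s h1 h4 hdesc hchain hcap hhigh hlow hwin
    right
    refine ⟨rfl, ?_⟩
    intro v hv
    by_cases hge : a + s ≤ v
    · exact hhigh v hv hge
    · by_cases hva : a ≤ v
      · refine goodb_false_of S a v ?_ hva (by omega)
        intro hmem
        have h' := (hlow (a - 1) (by omega)).mp hmem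
        simp only [List.mem_singleton] at h'
        omega
      · exfalso
        have h' := (hlow v (by omega)).mp hv
        simp only [List.mem_singleton] at h'
        omega
  | cons b rest' ih =>
    intro a w s h1 h4 hdesc hchain hcap hhigh hlow hwin
    have hgt : a > b := (List.pairwise_cons.mp hdesc).1 b (by simp)
    have habne : a ≠ b := by omega
    have htail : (b :: rest').Pairwise (· > ·) := List.Pairwise.of_cons hdesc
    have hrest : ∀ x ∈ rest', b > x := (List.pairwise_cons.mp htail).1
    have hbS : b ∈ S := (hlow b (by omega)).mpr (by simp)
    by_cases hab : a - 1 = b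
    · by_cases hs5 : s + 1 ≥ 5
      · -- A returns the straight's top card
        have hs4 : s = 4 := by omega
        have hw : w.getD 2 0 = a + 3 := by
          rw [hwin 2 (by rw [hs4]; norm_num)]
          push_cast
          ring
        left
        refine ⟨w.getD 2 0, ?_, ?_, ?_, ?_⟩
        · rw [scanGo, if_pos hab, if_pos hs5]
        · rw [hw]; exact hchain 3 (by omega) (by omega)
        · rw [hw]
          simp only [goodb, Bool.and_eq_true, decide_eq_true_eq]
          refine ⟨?_, ?_, ?_, ?_⟩
          · have e : a + 3 - 1 = a + 2 := by ring
            rw [e]; exact hchain 2 (by omega) (by omega)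
          · have e : a + 3 - 2 = a + 1 := by ring
            rw [e]; exact hchain 1 (by omega) (by omega)
          · have e : a + 3 - 3 = a + 0 := by ring
            rw [e]; exact hchain 0 (by omega) (by omega)
          · have e : a + 3 - 4 = b := by omega
            rw [e]; exact hbS
        · intro v hv hlt
          rw [hw] at hlt
          exact hhigh v hv (by omega)
      · -- extend the streak
        rw [scanGo, if_pos hab, if_neg hs5]
        apply ih b (a :: w.take 2) (s + 1) (by omega) (by omega) htail
        · intro k hk0 hk
          by_cases hk0' : k = 0
          · subst hk0'; simpa using hbS
          · have e : b + k = a + (k - 1) := by omega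
            rw [e]; exact hchain (k - 1) (by omega) (by omega)
        · have e : b + (s + 1) = a + s := by omega
          rw [e]; exact hcap
        · intro v hv hge
          exact hhigh v hv (by omega)
        · intro v hvb
          rw [hlow v (by omega)]
          simp only [List.mem_cons]
          constructor
          · rintro (rfl | h)
            · omega
            · exact h
          · tauto
        · intro k hk
          cases k with
          | zero => simp; omega
          | succ k' =>
            have hk2 : k' < 2 := by omega
            have e1 : (a :: (w.take 2)).getD (k' + 1) 0 = (w.take 2).getD k' 0 := by
              simp
            rw [e1, getD_take_of_lt w 2 k' 0 hk2]
            have := hwin k' (by push_cast at hk ⊢; omega)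
            push_cast at this ⊢
            omega
    · -- streak resets
      rw [scanGo, if_neg hab, if_pos habne]
      have hb2 : b ≤ a - 2 := by omega
      have ha1 : a - 1 ∉ S := by
        intro hmem
        have := (hlow (a - 1) (by omega)).mp hmem
        simp only [List.mem_cons] at this
        rcases this with h | h | h
        · omega
        · omega
        · exact absurd (hrest _ h) (by omega)
      apply ih b (a :: w.take 2) 1 (by omega) (by omega) htail
      · intro k hk0 hk
        have : k = 0 := by omega
        subst this; simpa using hbS
      · intro hmem
        have := (hlow (b + 1) (by omega)).mp hmem
        simp only [List.mem_cons] at this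
        rcases this with h | h | h
        · omega
        · omega
        · exact absurd (hrest _ h) (by omega)
      · intro v hv hge
        by_cases hva : a + s ≤ v
        · exact hhigh v hv hva
        · by_cases hva2 : a ≤ v
          · exact goodb_false_of S a v ha1 hva2 (by omega)
          · exfalso
            have := (hlow v (by omega)).mp hv
            simp only [List.mem_cons] at this
            rcases this with h | h | h
            · omega
            · omega
            · exact absurd (hrest _ h) (by omega)
      · intro v hvb
        rw [hlow v (by omega)]
        simp only [List.mem_cons]
        constructor
        · rintro (rfl | h)
          · omega
          · exact h
        · tauto
      · intro k hk
        exfalso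
        omega

lemma find_transfer (L V : List Int) (hmem : ∀ x : Int, x ∈ V ↔ x ∈ L) :
    L.find? (fun v => [1, 2, 3, 4].all (fun k => PySem.Set.contains V (v - k)))
      = L.find? (goodb L) := by
  have congr : ∀ (M : List Int) (p q : Int → Bool), (∀ x, p x = q x) → M.find? p = M.find? q := by
    intro M p q hpq
    induction M with
    | nil => rfl
    | cons a t iht => rw [List.find?_cons, List.find?_cons, hpq a]; split <;> simp [iht]
  apply congr
  intro v
  simp [goodb, hmem]

lemma scan_core (L : List Int) (hd : L.Pairwise (· > ·)) :
    scanGo [] L 1 = L.find? (goodb L) := by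
  cases L with
  | nil => rfl
  | cons a rest =>
    have hmax : ∀ x ∈ a :: rest, x ≤ a := by
      intro x hx
      rcases List.mem_cons.mp hx with rfl | hx
      · exact le_refl x
      · exact le_of_lt ((List.pairwise_cons.mp hd).1 x hx)
    have hm := scan_main (a :: rest) rest a [] 1 (by norm_num) (by norm_num) hd
      (by intro k h0 h1
          have : k = 0 := by omega
          subst this
          simp)
      (by intro h; have := hmax _ h; omega)
      (by intro v hv hge; exact absurd (hmax v hv) (by omega))
      (by intro v _; exact Iff.rfl)
      (by intro k hk; exfalso; omega)
    rcases hm with ⟨m, hs, hmem, hg, hmx⟩ | ⟨hs, hall⟩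
    · rw [hs, find?_first_desc (a :: rest) _ hd m hmem hg hmx]
    · rw [hs]
      symm
      rw [List.find?_eq_none]
      intro x hx
      simp [hall x hx]

-- bundled consequences of the three preceding lemmas, for each shape of the scanned list
lemma assemble (u L V : List Int) (hu : scanGo [] u 1 = scanGo [] L 1)
    (hd : L.Pairwise (· > ·)) (hmem : ∀ x : Int, x ∈ V ↔ x ∈ L) :
    ((PySem.List.pyRange 0 ((u.length : Int) - 1) 1).foldl (stepA u) (none, 1)).1.getD 0
      = (match L.find? (fun v => [1, 2, 3, 4].all (fun k => PySem.Set.contains V (v - k))) with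
         | some v => v
         | none => 0) := by
  have T := scan_translate u u.length 0 1 (by omega) (by norm_num) (by norm_num)
  simp only [Nat.cast_zero, List.take_zero, List.drop_zero, List.reverse_nil, List.take_nil] at T
  rw [T, hu, scan_core L hd, ← find_transfer L V hmem]
  cases h : L.find? (fun v => [1, 2, 3, 4].all (fun k => PySem.Set.contains V (v - k))) <;> simp

-- ===== VERDICT (by name: the statement is the Claim_ definition above) =====
theorem casino_straight_high_py_spec : Claim_equal_casino_straight_high_py := by
  intro ranks _
  unfold Spec_casino_straight_high_py casino_straight_high_py casino_straight_high_py_alt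
  simp only []
  set P := ranks.filter (fun r => decide (0 < r)) with hP
  set S0 : List Int := PySem.Set.ofList P with hS0
  set LA := PySem.List.sorted S0 (fun x => x) true with hLA
  have hnd : S0.Nodup := PySem.Set.nodup_ofList P
  have hperm : LA.Perm S0 := PySem.List.sorted_perm S0 (fun x => x) true
  have hLnd : LA.Nodup := hperm.nodup_iff.mpr hnd
  have hdesc : LA.Pairwise (· > ·) := by
    have h1 := PySem.List.sorted_pairwise_rev (xs := S0) (key := fun x : Int => x)
    exact (List.Pairwise.and h1 hLnd).imp (fun h => lt_of_le_of_ne h.1 (Ne.symm h.2))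
  have hpos : ∀ x ∈ S0, 1 ≤ x := by
    intro x hx
    have hxP : x ∈ P := (PySem.Set.mem_ofList ..).mp hx
    have := (List.mem_filter.mp hxP).2
    simp at this
    omega
  have hposL : ∀ x ∈ LA, 1 ≤ x := fun x hx => hpos x (hperm.subset hx)
  have hmemLA : ∀ x : Int, x ∈ S0 ↔ x ∈ LA := fun x => (hperm.mem_iff).symm
  by_cases hc14 : (14 : Int) ∈ S0
  · rw [if_pos ((PySem.List.mem_sorted ..).mpr hc14)]
    rw [if_pos (by simpa [PySem.Set.contains_iff] using hc14)]
    by_cases hc1 : (1 : Int) ∈ S0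
    · -- ace and deuce-low card both present: the appended 1 duplicates the last element
      rw [PySem.Set.add_of_mem hc1]
      apply assemble (LA ++ [1]) LA S0 ?_ hdesc hmemLA
      exact scanGo_strip LA (by
          intro hnil
          rw [hnil] at hmemLA
          simpa using (hmemLA 14).mp hc14)
        (getLast?_pairwise_gt_min LA hdesc ((hmemLA 1).mp hc1) hposL) [] 1
    · -- ace present, 1 absent: both programs extend the list by a final 1
      rw [PySem.Set.add_of_not_mem hc1]
      have hd' : (LA ++ [1]).Pairwise (· > ·) := by
        rw [List.pairwise_append]
        refine ⟨hdesc, by simp, ?_⟩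
        intro x hx y hy
        have h1 : 1 ≤ x := hposL x hx
        have h2 : x ≠ 1 := fun hx1 => hc1 (hperm.subset (hx1 ▸ hx))
        simp at hy
        omega
      have hsorted : PySem.List.sorted (S0 ++ [1]) (fun x : Int => x) true = LA ++ [1] := by
        apply PySem.List.sorted_rev_eq_of_perm_of_pairwise_gt
        · exact hperm.append_right [1]
        · exact hd'
      rw [hsorted]
      apply assemble (LA ++ [1]) (LA ++ [1]) (S0 ++ [1]) rfl hd'
      intro x
      simp [List.mem_append, hmemLA x]
  · rw [if_neg (fun h => hc14 ((PySem.List.mem_sorted ..).mp h))]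
    rw [if_neg (by simpa [PySem.Set.contains_iff] using hc14)]
    exact assemble LA LA S0 rfl hdesc hmemLA
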